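-- pv_equiv track=rewrite | github.com/niloy37/resume-parser | rule_based_knowledge_base.py | evaluate_education_requirement
-- ===== SOURCE A (Python) =====
-- from typing import Dict, List, Any, Tuple
--
-- class EducationKnowledgeBase:
--     """
--     Knowledge base for education level recognition and evaluation
--     """
--
--     @staticmethod
--     def get_education_levels() -> Dict[str, List[str]]:
--         """
--         Education level keywords for recognition
--         """
--         return {
--             'phd': ['phd', 'ph.d', 'doctorate', 'doctoral', 'doctor of philosophy'],
--             'master': ['master', 'msc', 'm.sc', 'ma', 'm.a', 'mba', 'm.b.a', 'ms', 'm.s', 'masters'],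
--             'bachelor': ['bachelor', 'bsc', 'b.sc', 'ba', 'b.a', 'bs', 'b.s', 'be', 'b.e', 'btech', 'b.tech', 'bachelors']
--         }
--
--     @staticmethod
--     def get_education_score(education_level: str) -> int:
--         """
--         Get numerical score for education level
--         """
--         scores = {
--             'phd': 100,
--             'master': 80,
--             'bachelor': 60,
--             'none': 0
--         }
--         return scores.get(education_level.lower(), 0)
--
-- def evaluate_education_requirement(candidate_education: List[str], min_education: str) -> bool:
--     """
--     Rule: Check if candidate meets minimum education requirement
--     """
--     if min_education == 'none':
--         return True
--
--     education_text = ' '.join(candidate_education).lower()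
--     education_levels = EducationKnowledgeBase.get_education_levels()
--
--     if min_education == 'bachelor':
--         return any(level in education_text for level in
--                   education_levels['bachelor'] + education_levels['master'] + education_levels['phd'])
--     elif min_education == 'master':
--         return any(level in education_text for level in
--                   education_levels['master'] + education_levels['phd'])
--     elif min_education == 'phd':
--         return any(level in education_text for level in education_levels['phd'])
--
--     return False
-- ===== SOURCE B (Python) =====
-- def evaluate_education_requirement(candidate_education, min_education):
--     """Level-score reformulation: score the candidate once, compare against a threshold map."""
--     thresholds = {'none': 0, 'bachelor': 60, 'master': 80, 'phd': 100}
--     if min_education not in thresholds: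
--         return False
--     text = ' '.join(candidate_education).lower()
--     phd = ['phd', 'ph.d', 'doctorate', 'doctoral', 'doctor of philosophy']
--     master = ['master', 'msc', 'm.sc', 'ma', 'm.a', 'mba', 'm.b.a', 'ms', 'm.s', 'masters']
--     bachelor = ['bachelor', 'bsc', 'b.sc', 'ba', 'b.a', 'bs', 'b.s', 'be', 'b.e', 'btech', 'b.tech', 'bachelors']
--     if any(k in text for k in phd):
--         score = 100
--     elif any(k in text for k in master):
--         score = 80
--     elif any(k in text for k in bachelor):
--         score = 60
--     else:
--         score = 0
--     return score >= thresholds[min_education]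
-- ===== Notes on version B (the rewrite author's own statement) =====
-- stated objective: alternative
-- what changed: Replaced the per-requirement union-of-keyword-lists membership branches by scoring the candidate's highest education level once (100/80/60/0) and comparing it numerically against a threshold map keyed by min_education (unknown keys still yield False).
import Mathlib
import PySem

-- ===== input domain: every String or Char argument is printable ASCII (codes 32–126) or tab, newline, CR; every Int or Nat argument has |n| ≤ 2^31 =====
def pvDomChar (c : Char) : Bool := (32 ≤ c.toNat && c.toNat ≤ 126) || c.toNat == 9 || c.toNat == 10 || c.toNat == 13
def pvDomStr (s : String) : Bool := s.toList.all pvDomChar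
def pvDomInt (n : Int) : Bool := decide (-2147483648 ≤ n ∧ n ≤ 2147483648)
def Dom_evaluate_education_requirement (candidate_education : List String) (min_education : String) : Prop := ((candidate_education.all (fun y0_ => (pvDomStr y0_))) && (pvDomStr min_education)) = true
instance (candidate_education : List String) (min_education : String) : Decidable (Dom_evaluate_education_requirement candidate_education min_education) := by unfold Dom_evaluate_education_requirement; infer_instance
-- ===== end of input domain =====

-- B rephrases A's per-branch keyword-union membership as a single numeric level score compared against a threshold map; equivalence of return values is proved (no side effects involved).

-- ===== PORT A =====
-- keyword lists from EducationKnowledgeBase.get_education_levels()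
def eduPhd : List String := ["phd", "ph.d", "doctorate", "doctoral", "doctor of philosophy"]
def eduMaster : List String := ["master", "msc", "m.sc", "ma", "m.a", "mba", "m.b.a", "ms", "m.s", "masters"]
def eduBachelor : List String := ["bachelor", "bsc", "b.sc", "ba", "b.a", "bs", "b.s", "be", "b.e", "btech", "b.tech", "bachelors"]

def evaluate_education_requirement (candidate_education : List String) (min_education : String) : Bool :=
  if min_education == "none" then true
  else
    let education_text := PySem.Str.lower (PySem.Str.join " " candidate_education)
    if min_education == "bachelor" then
      (eduBachelor ++ eduMaster ++ eduPhd).any (fun level => PySem.Str.isIn level education_text)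
    else if min_education == "master" then
      (eduMaster ++ eduPhd).any (fun level => PySem.Str.isIn level education_text)
    else if min_education == "phd" then
      eduPhd.any (fun level => PySem.Str.isIn level education_text)
    else false

-- ===== PORT B =====
-- Source B's keyword list literals are identical to A's; the same Lean constants stand for them

def evaluate_education_requirement_alt (candidate_education : List String) (min_education : String) : Bool :=
  let thresholds : PySem.Dict String Int :=
    PySem.Dict.ofList [("none", 0), ("bachelor", 60), ("master", 80), ("phd", 100)]
  match thresholds.get? min_education with
  | none => false
  | some t =>
    let text := PySem.Str.lower (PySem.Str.join " " candidate_education)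
    let score : Int :=
      if eduPhd.any (fun k => PySem.Str.isIn k text) then 100
      else if eduMaster.any (fun k => PySem.Str.isIn k text) then 80
      else if eduBachelor.any (fun k => PySem.Str.isIn k text) then 60
      else 0
    decide (t ≤ score)

-- ===== PRECONDITION & SPEC =====
def Spec_evaluate_education_requirement (candidate_education : List String) (min_education : String) (out : Bool) : Prop := out = evaluate_education_requirement_alt candidate_education min_education
instance (candidate_education : List String) (min_education : String) (out : Bool) : Decidable (Spec_evaluate_education_requirement candidate_education min_education out) := by unfold Spec_evaluate_education_requirement; infer_instance

-- ===== CLAIM (what is proved, stated in full; the proofs are below) =====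
def Claim_equal_evaluate_education_requirement : Prop := ∀ (candidate_education : List String) (min_education : String), Dom_evaluate_education_requirement candidate_education min_education → Spec_evaluate_education_requirement candidate_education min_education (evaluate_education_requirement candidate_education min_education)

-- ===== LEMMAS AND PROOFS =====

-- ===== VERDICT (by name: the statement is the Claim_ definition above) =====
theorem evaluate_education_requirement_spec : Claim_equal_evaluate_education_requirement := by
  intro ce me _
  unfold Spec_evaluate_education_requirement
  simp only [evaluate_education_requirement, evaluate_education_requirement_alt]
  by_cases h0 : me = "none"
  · subst h0
    rw [show (PySem.Dict.ofList [("none", (0:Int)), ("bachelor", 60), ("master", 80), ("phd", 100)]).get? "none" = some 0 from by decide]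
    simp only [List.any_append]
    cases hP : eduPhd.any (fun k => PySem.Str.isIn k (PySem.Str.lower (PySem.Str.join " " ce))) <;>
      cases hM : eduMaster.any (fun k => PySem.Str.isIn k (PySem.Str.lower (PySem.Str.join " " ce))) <;>
      cases hB : eduBachelor.any (fun k => PySem.Str.isIn k (PySem.Str.lower (PySem.Str.join " " ce))) <;>
      simp [hP, hM, hB]
  · by_cases h1 : me = "bachelor"
    · subst h1
      rw [show (PySem.Dict.ofList [("none", (0:Int)), ("bachelor", 60), ("master", 80), ("phd", 100)]).get? "bachelor" = some 60 from by decide]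
      simp only [List.any_append]
      cases hP : eduPhd.any (fun k => PySem.Str.isIn k (PySem.Str.lower (PySem.Str.join " " ce))) <;>
        cases hM : eduMaster.any (fun k => PySem.Str.isIn k (PySem.Str.lower (PySem.Str.join " " ce))) <;>
        cases hB : eduBachelor.any (fun k => PySem.Str.isIn k (PySem.Str.lower (PySem.Str.join " " ce))) <;>
        simp [hP, hM, hB]
    · by_cases h2 : me = "master"
      · subst h2
        rw [show (PySem.Dict.ofList [("none", (0:Int)), ("bachelor", 60), ("master", 80), ("phd", 100)]).get? "master" = some 80 from by decide]
        simp only [List.any_append]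
        cases hP : eduPhd.any (fun k => PySem.Str.isIn k (PySem.Str.lower (PySem.Str.join " " ce))) <;>
          cases hM : eduMaster.any (fun k => PySem.Str.isIn k (PySem.Str.lower (PySem.Str.join " " ce))) <;>
          cases hB : eduBachelor.any (fun k => PySem.Str.isIn k (PySem.Str.lower (PySem.Str.join " " ce))) <;>
          simp [hP, hM, hB]
      · by_cases h3 : me = "phd"
        · subst h3
          rw [show (PySem.Dict.ofList [("none", (0:Int)), ("bachelor", 60), ("master", 80), ("phd", 100)]).get? "phd" = some 100 from by decide]
          simp only [List.any_append]
          cases hP : eduPhd.any (fun k => PySem.Str.isIn k (PySem.Str.lower (PySem.Str.join " " ce))) <;>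
            cases hM : eduMaster.any (fun k => PySem.Str.isIn k (PySem.Str.lower (PySem.Str.join " " ce))) <;>
            cases hB : eduBachelor.any (fun k => PySem.Str.isIn k (PySem.Str.lower (PySem.Str.join " " ce))) <;>
            simp [hP, hM, hB]
        · have hnone : (PySem.Dict.ofList [("none", (0:Int)), ("bachelor", 60), ("master", 80), ("phd", 100)]).get? me = none := by
            rw [PySem.Dict.get?_eq_none_iff_not_mem_keys]
            rw [show (PySem.Dict.ofList [("none", (0:Int)), ("bachelor", 60), ("master", 80), ("phd", 100)]).keys = ["none", "bachelor", "master", "phd"] from by decide]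
            simp [h0, h1, h2, h3]
          rw [hnone]
          simp [h0, h1, h2, h3]
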